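-- pv_equiv track=rewrite | github.com/FengDaoYes/MWBM | cj/sqlhx.py | gz10
-- ===== SOURCE A (Python) =====
-- def gz10(sql):
-- 	#在每个字符面前添加%
-- 	sql = sql.lower()
-- 	zfc = ""
-- 	for i in sql:
-- 		if i != ' ':
-- 			x = "%"+i
-- 			zfc += x
-- 		else:
-- 			zfc += ' '
-- 	return zfc
-- ===== SOURCE B (Python) =====
-- def gz10(sql):
--     # tokenize-map-join: lowercase, split on ' ', prefix '%' to every char of each token, rejoin
--     s = sql.lower()
--     return ' '.join(''.join('%' + c for c in tok) for tok in s.split(' '))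
-- ===== Notes on version B (the rewrite author's own statement) =====
-- stated objective: alternative
-- what changed: Replaces A's per-character space/non-space branching accumulator loop with a tokenize-map-join pipeline: lowercase, split on the single space character, prefix a percent sign before each character of each token, and rejoin with a space (the split keeps empty tokens, so spacing is reconstructed exactly).
import Mathlib
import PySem

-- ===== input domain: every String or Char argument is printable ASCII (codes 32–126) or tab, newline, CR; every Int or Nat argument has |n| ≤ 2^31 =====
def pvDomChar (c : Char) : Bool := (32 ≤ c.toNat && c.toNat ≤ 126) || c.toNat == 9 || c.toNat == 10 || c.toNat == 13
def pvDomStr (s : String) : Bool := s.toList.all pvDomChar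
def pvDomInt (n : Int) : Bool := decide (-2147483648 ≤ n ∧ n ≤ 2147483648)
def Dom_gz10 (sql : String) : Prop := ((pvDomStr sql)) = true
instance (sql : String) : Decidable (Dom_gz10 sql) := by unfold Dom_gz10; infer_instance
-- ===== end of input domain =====

-- B replaces A's per-character accumulator loop with a tokenize-map-join pipeline (alternative decomposition, same cost).

-- ===== PORT A =====
-- A: lowercase, then one loop over the characters, appending "%"+c for non-space and " " for space.
def gz10 (sql : String) : String :=
  String.ofList
    ((PySem.Str.lower sql).toList.foldl
      (fun zfc i => if i ≠ ' ' then zfc ++ ('%' :: [i]) else zfc ++ [' ']) [])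

-- ===== PORT B =====
-- B: lowercase, split on ' ', prefix '%' before every char of each token, rejoin with ' '.
def gz10_alt (sql : String) : String :=
  String.ofList
    (PySem.Chars.join [' ']
      ((PySem.Chars.splitOn (PySem.Str.lower sql).toList [' ']).map
        (fun tok => tok.flatMap (fun c => ['%', c]))))

-- ===== PRECONDITION & SPEC =====
def Spec_gz10 (sql : String) (out : String) : Prop := out = gz10_alt sql
instance (sql : String) (out : String) : Decidable (Spec_gz10 sql out) := by unfold Spec_gz10; infer_instance

-- ===== CLAIM (what is proved, stated in full; the proofs are below) =====
def Claim_equal_gz10 : Prop := ∀ (sql : String), Dom_gz10 sql → Spec_gz10 sql (gz10 sql)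

-- ===== LEMMAS AND PROOFS =====

-- reference single-character splitter (proof helper; always returns a nonempty list)
def splitSp : List Char → List (List Char)
  | [] => [[]]
  | c :: rest =>
    if c = ' ' then [] :: splitSp rest
    else
      match splitSp rest with
      | [] => [[c]]
      | t :: ts => (c :: t) :: ts

theorem splitSp_ne_nil (cs : List Char) : splitSp cs ≠ [] := by
  cases cs with
  | nil => simp [splitSp]
  | cons c rest =>
    simp only [splitSp]
    split_ifs with h
    · simp
    · cases hr : splitSp rest <;> simp

theorem go_eq : ∀ (fuel : Nat) (l cur : List Char) (acc : List (List Char)),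
    l.length < fuel →
    PySem.Chars.splitOn.go [' '] fuel l cur acc =
      acc.reverse ++ (match splitSp l with
        | [] => [cur.reverse]
        | t :: ts => (cur.reverse ++ t) :: ts) := by
  intro fuel
  induction fuel with
  | zero => intro l cur acc h; omega
  | succ fuel ih =>
    intro l cur acc h
    cases l with
    | nil =>
      rw [PySem.Chars.splitOn.go.eq_def]
      simp [splitSp]
    | cons c rest =>
      rw [PySem.Chars.splitOn.go.eq_def]
      simp only [List.isPrefixOf, Bool.and_true]
      by_cases hc : c = ' '
      · subst hc
        rw [if_pos (show (' ' == ' ') = true from rfl)]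
        have hd : List.drop [' '].length (' ' :: rest) = rest := rfl
        have hlt : rest.length < fuel := by simp at h; omega
        rw [hd, ih rest [] (cur.reverse :: acc) hlt]
        cases hr : splitSp rest with
        | nil => exact absurd hr (splitSp_ne_nil rest)
        | cons t ts => simp [splitSp, hr]
      · have hne : ¬ ((' ' == c) = true) := by
          intro hh
          rw [beq_iff_eq] at hh
          exact hc hh.symm
        rw [if_neg hne]
        have hlt : rest.length < fuel := by simp at h; omega
        rw [ih rest (c :: cur) acc hlt]
        cases hr : splitSp rest with
        | nil => exact absurd hr (splitSp_ne_nil rest)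
        | cons t ts => simp [splitSp, hc, hr]

theorem splitOn_eq_splitSp (cs : List Char) :
    PySem.Chars.splitOn cs [' '] = splitSp cs := by
  unfold PySem.Chars.splitOn
  rw [go_eq (cs.length + 1) cs [] [] (by omega)]
  cases hr : splitSp cs with
  | nil => exact absurd hr (splitSp_ne_nil cs)
  | cons t ts => simp

-- join sep ((a ++ b) :: xs) = a ++ join sep (b :: xs)
theorem join_cons_append (sep a b : List Char) (xs : List (List Char)) :
    PySem.Chars.join sep ((a ++ b) :: xs) = a ++ PySem.Chars.join sep (b :: xs) := by
  cases xs with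
  | nil => simp [PySem.Chars.join_singleton]
  | cons q rest => simp [PySem.Chars.join_cons_cons, List.append_assoc]

theorem join_splitSp (cs : List Char) :
    PySem.Chars.join [' '] ((splitSp cs).map (fun tok => tok.flatMap (fun c => ['%', c])))
      = cs.flatMap (fun c => if c ≠ ' ' then ['%', c] else [' ']) := by
  induction cs with
  | nil => simp [splitSp, PySem.Chars.join_singleton]
  | cons c rest ih =>
    cases hr : splitSp rest with
    | nil => exact absurd hr (splitSp_ne_nil rest)
    | cons t ts =>
      rw [hr, List.map_cons] at ih
      by_cases hc : c = ' '
      · subst hc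
        have hs : splitSp (' ' :: rest) = [] :: t :: ts := by simp [splitSp, hr]
        rw [hs, List.map_cons, List.map_cons, PySem.Chars.join_cons_cons,
          List.flatMap_cons, ih]
        simp
      · have hs : splitSp (c :: rest) = (c :: t) :: ts := by simp [splitSp, hc, hr]
        rw [hs, List.map_cons, List.flatMap_cons]
        rw [join_cons_append, ih, List.flatMap_cons, if_pos hc]

theorem foldl_eq_flatMap (cs : List Char) :
    cs.foldl (fun zfc i => if i ≠ ' ' then zfc ++ ('%' :: [i]) else zfc ++ [' ']) []
      = cs.flatMap (fun c => if c ≠ ' ' then ['%', c] else [' ']) := by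
  have h : ∀ (l : List Char) (acc : List Char),
      l.foldl (fun zfc i => if i ≠ ' ' then zfc ++ ('%' :: [i]) else zfc ++ [' ']) acc
        = acc ++ l.flatMap (fun c => if c ≠ ' ' then ['%', c] else [' ']) := by
    intro l
    induction l with
    | nil => simp
    | cons c rest ih =>
      intro acc
      rw [List.foldl_cons, List.flatMap_cons]
      show List.foldl _ (if c ≠ ' ' then acc ++ ('%' :: [c]) else acc ++ [' ']) rest = _
      split_ifs with hc <;> rw [ih] <;> simp [List.append_assoc]
  simpa using h cs []

-- ===== VERDICT (by name: the statement is the Claim_ definition above) =====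
theorem gz10_spec : Claim_equal_gz10 := by
  intro sql _
  unfold Spec_gz10 gz10 gz10_alt
  rw [splitOn_eq_splitSp, join_splitSp, foldl_eq_flatMap]
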